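-- pv_equiv track=rewrite | github.com/CNAmazing/FacadeRegularization | Atools.py | boxes_classification_HW_Get_idx
-- ===== SOURCE A (Python) =====
-- def boxes_classification_HW_Get_idx(boxes,X_label,x_w_label,):
--     x_group={}
--
--     for i,(x1,x2) in enumerate(zip(X_label,x_w_label)):
--         key=str(x1)+'_'+str(x2)
--         if key not in x_group:
--             x_group[key] = {
--                 'id': [],  # 原来的列表换个名字存储
--             }
--         x_group[key]['id'].append(i)
--         # x_group.setdefault(key, []).append(boxes[i])
--     return x_group
-- ===== SOURCE B (Python) =====
-- def boxes_classification_HW_Get_idx(boxes, X_label, x_w_label):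
--     keys = [str(a) + '_' + str(b) for a, b in zip(X_label, x_w_label)]
--     return {k: {'id': [i for i, kk in enumerate(keys) if kk == k]}
--             for k in dict.fromkeys(keys)}
-- ===== Notes on version B (the rewrite author's own statement) =====
-- stated objective: alternative
-- what changed: A builds the grouping in one hash-accumulation pass that creates/updates a nested dict entry per element; B first materialises the key list, de-duplicates it in first-occurrence order with dict.fromkeys, and then gathers each distinct key's indices with a comprehension over the enumerated key list.
import Mathlib
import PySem

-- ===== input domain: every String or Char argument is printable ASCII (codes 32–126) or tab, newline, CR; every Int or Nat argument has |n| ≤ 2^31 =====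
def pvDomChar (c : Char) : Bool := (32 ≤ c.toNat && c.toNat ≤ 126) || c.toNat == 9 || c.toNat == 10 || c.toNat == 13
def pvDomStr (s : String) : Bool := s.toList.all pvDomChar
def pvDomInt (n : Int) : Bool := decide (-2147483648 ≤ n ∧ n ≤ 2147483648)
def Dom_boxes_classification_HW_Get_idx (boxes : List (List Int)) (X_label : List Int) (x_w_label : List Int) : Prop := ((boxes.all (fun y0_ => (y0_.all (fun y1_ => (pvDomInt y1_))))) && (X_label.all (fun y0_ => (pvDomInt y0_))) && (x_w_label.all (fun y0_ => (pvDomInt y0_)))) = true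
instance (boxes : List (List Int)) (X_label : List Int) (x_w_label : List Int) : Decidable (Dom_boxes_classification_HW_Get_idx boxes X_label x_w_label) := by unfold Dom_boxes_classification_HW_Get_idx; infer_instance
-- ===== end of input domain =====

-- B replaces A's hash-accumulation pass by ordered de-duplication of the key list followed by
-- a gather of the matching indices per distinct key (objective: alternative decomposition).

-- ===== PORT A =====
def boxes_classification_HW_Get_idx (boxes : List (List Int)) (X_label : List Int) (x_w_label : List Int) : List (String × List (String × List Int)) :=
  -- x_group = {}; for i,(x1,x2) in enumerate(zip(X_label,x_w_label)): …
  let x_group : PySem.Dict String (PySem.Dict String (List Int)) :=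
    (PySem.List.enumerate (X_label.zip x_w_label) 0).foldl
      (fun d p =>
        let key := PySem.Int.toStr p.2.1 ++ "_" ++ PySem.Int.toStr p.2.2
        let d := if d.contains key = false then d.insert key (PySem.Dict.mk [("id", [])]) else d
        -- x_group[key]['id'].append(i)
        d.modify key (PySem.Dict.mk []) (fun inner => inner.modify "id" [] (fun l => l ++ [p.1])))
      PySem.Dict.empty
  x_group.items.map (fun p => (p.1, p.2.items))

-- ===== PORT B =====
def boxes_classification_HW_Get_idx_alt (boxes : List (List Int)) (X_label : List Int) (x_w_label : List Int) : List (String × List (String × List Int)) :=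
  let keys := (X_label.zip x_w_label).map (fun p => PySem.Int.toStr p.1 ++ "_" ++ PySem.Int.toStr p.2)
  (PySem.List.dedup keys).map (fun k =>
    (k, [("id", ((PySem.List.enumerate keys 0).filter (fun q => q.2 == k)).map (·.1))]))

-- ===== PRECONDITION & SPEC =====
def Spec_boxes_classification_HW_Get_idx (boxes : List (List Int)) (X_label : List Int) (x_w_label : List Int) (out : List (String × List (String × List Int))) : Prop := out = boxes_classification_HW_Get_idx_alt boxes X_label x_w_label
instance (boxes : List (List Int)) (X_label : List Int) (x_w_label : List Int) (out : List (String × List (String × List Int))) : Decidable (Spec_boxes_classification_HW_Get_idx boxes X_label x_w_label out) := by unfold Spec_boxes_classification_HW_Get_idx; infer_instance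

-- ===== CLAIM (what is proved, stated in full; the proofs are below) =====
def Claim_equal_boxes_classification_HW_Get_idx : Prop := ∀ (boxes : List (List Int)) (X_label : List Int) (x_w_label : List Int), Dom_boxes_classification_HW_Get_idx boxes X_label x_w_label → Spec_boxes_classification_HW_Get_idx boxes X_label x_w_label (boxes_classification_HW_Get_idx boxes X_label x_w_label)

-- ===== LEMMAS AND PROOFS =====

-- A's loop step, abstracted over the (index, key) pair (the key already computed).
def pvStep (d : PySem.Dict String (PySem.Dict String (List Int))) (p : Int × String) :
    PySem.Dict String (PySem.Dict String (List Int)) :=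
  let d' := if d.contains p.2 = false then d.insert p.2 (PySem.Dict.mk [("id", [])]) else d
  d'.modify p.2 (PySem.Dict.mk []) (fun inner => inner.modify "id" [] (fun l => l ++ [p.1]))

def pvGather (ks : List String) (k : String) : List Int :=
  ((PySem.List.enumerate ks 0).filter (fun q => q.2 == k)).map (·.1)

def pvEntry (ks : List String) (k : String) : String × PySem.Dict String (List Int) :=
  (k, PySem.Dict.mk [("id", pvGather ks k)])

-- enumerate commutes with map on the payload
theorem pv_enumerate_map {α β : Type} (f : α → β) (l : List α) (s : Int) :
    PySem.List.enumerate (l.map f) s = (PySem.List.enumerate l s).map (fun p => (p.1, f p.2)) := by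
  induction l generalizing s with
  | nil => simp [PySem.List.enumerate_nil]
  | cons x xs ih => simp [PySem.List.enumerate_cons, ih]

theorem pv_gather_append (ks : List String) (k k' : String) :
    pvGather (ks ++ [k]) k' =
      pvGather ks k' ++ (if k = k' then [((ks.length : Int))] else []) := by
  simp only [pvGather, PySem.List.enumerate_append, List.filter_append, List.map_append]
  congr 1
  by_cases h : k = k' <;>
    simp [PySem.List.enumerate_cons, PySem.List.enumerate_nil, h]

theorem pv_filter_enumerate_nil (ks : List String) (k : String) (h : k ∉ ks) (s : Int) :
    (PySem.List.enumerate ks s).filter (fun q => q.2 == k) = [] := by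
  induction ks generalizing s with
  | nil => simp [PySem.List.enumerate_nil]
  | cons x xs ih =>
      have hx : x ≠ k := fun hxk => h (hxk ▸ List.mem_cons_self)
      simp only [PySem.List.enumerate_cons, List.filter_cons]
      simp only [beq_iff_eq, hx, if_false]
      exact ih (fun hm => h (List.mem_cons_of_mem _ hm)) _

theorem pv_gather_of_not_mem (ks : List String) (k : String) (h : k ∉ ks) :
    pvGather ks k = [] := by
  simp [pvGather, pv_filter_enumerate_nil ks k h]

theorem pv_dedup_append (ks : List String) (k : String) :
    PySem.List.dedup (ks ++ [k]) =
      if k ∈ ks then PySem.List.dedup ks else PySem.List.dedup ks ++ [k] := by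
  simp only [PySem.List.dedup, PySem.Set.ofList, List.foldl_append, List.foldl_cons,
    List.foldl_nil, PySem.Set.add]
  have hmem := PySem.Set.mem_ofList ks k
  simp only [PySem.Set.ofList, PySem.Set.empty] at hmem
  by_cases h : k ∈ ks
  · rw [if_pos, if_pos h]
    simp [hmem, h]
  · rw [if_neg, if_neg h]
    simp [hmem, h]

-- the inner one-key dict: {'id': g}['id'].append(n)
theorem pv_inner (g : List Int) (n : Int) :
    (PySem.Dict.mk [("id", g)]).modify "id" [] (fun l => l ++ [n]) =
      PySem.Dict.mk [("id", g ++ [n])] := by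
  simp [PySem.Dict.modify, PySem.Dict.insert, PySem.Dict.getD, PySem.Dict.get?,
    PySem.Dict.contains]

theorem pv_keys_of_items (d : PySem.Dict String (PySem.Dict String (List Int)))
    (ks : List String) (h : d.items = (PySem.List.dedup ks).map (pvEntry ks)) :
    d.keys = PySem.List.dedup ks := by
  simp only [PySem.Dict.keys, h, List.map_map]
  have hid : ((fun p : String × PySem.Dict String (List Int) => p.1) ∘ pvEntry ks) = id := by
    funext x; simp [pvEntry]
  rw [hid, List.map_id]

-- main invariant: A's fold over the enumerated key list builds exactly B's table
theorem pv_main (ks : List String) :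
    ((PySem.List.enumerate ks 0).foldl pvStep PySem.Dict.empty).items =
      (PySem.List.dedup ks).map (pvEntry ks) := by
  induction ks using List.reverseRecOn with
  | nil => simp [PySem.List.enumerate_nil, PySem.List.dedup, PySem.Set.ofList,
      PySem.Dict.empty]
  | append_singleton ks k ih =>
      set D := (PySem.List.enumerate ks 0).foldl pvStep PySem.Dict.empty with hD
      have hkeys : D.keys = PySem.List.dedup ks := pv_keys_of_items D ks ih
      have hnodup : D.keys.Nodup := by rw [hkeys]; exact PySem.List.nodup_dedup ks
      have hmemkeys : ∀ k', k' ∈ D.keys ↔ k' ∈ ks := by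
        intro k'; rw [hkeys]; exact PySem.List.mem_dedup ks k'
      rw [PySem.List.enumerate_append, List.foldl_append]
      simp only [PySem.List.enumerate_cons, PySem.List.enumerate_nil, List.foldl_cons,
        List.foldl_nil, zero_add]
      rw [← hD]
      by_cases hk : k ∈ ks
      · -- key already present: modify appends the new index
        have hc : D.contains k = true := by
          rw [PySem.Dict.contains_eq_decide_mem_keys]
          simp [hmemkeys, hk]
        have hval : D.getD k (PySem.Dict.mk []) = PySem.Dict.mk [("id", pvGather ks k)] := by
          apply PySem.Dict.getD_of_mem_items D _ hnodup
          rw [ih]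
          exact List.mem_map.2 ⟨k, (PySem.List.mem_dedup ks k).2 hk, rfl⟩
        have hstep : pvStep D (((ks.length : Int)), k) =
            D.insert k ((D.getD k (PySem.Dict.mk [])).modify "id" []
              (fun l => l ++ [((ks.length : Int))])) := by
          simp [pvStep, PySem.Dict.modify, hc]
        rw [hstep, hval, pv_inner]
        rw [PySem.Dict.items_insert_of_contains _ _ hc]
        rw [ih, pv_dedup_append, if_pos hk, List.map_map]
        apply List.map_congr_left
        intro k' hk'
        have hk'ks : k' ∈ ks := (PySem.List.mem_dedup ks k').1 hk'
        by_cases he : k' = k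
        · subst he
          simp [pvEntry, pv_gather_append]
        · have hne : ¬ (k = k') := fun h => he h.symm
          simp [pvEntry, pv_gather_append, he, hne]
      · -- fresh key: it is appended at the end with the single new index
        have hc : D.contains k = false := by
          rw [PySem.Dict.contains_eq_decide_mem_keys]
          simp [hmemkeys, hk]
        set D' := D.insert k (PySem.Dict.mk [("id", [])]) with hD'
        have hc' : D'.contains k = true := PySem.Dict.contains_insert_self D k _
        have hval : D'.getD k (PySem.Dict.mk []) = PySem.Dict.mk [("id", [])] :=
          PySem.Dict.getD_insert_self D k _ _
        have hstep : pvStep D (((ks.length : Int)), k) =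
            D'.insert k ((D'.getD k (PySem.Dict.mk [])).modify "id" []
              (fun l => l ++ [((ks.length : Int))])) := by
          simp [pvStep, PySem.Dict.modify, hc, hD']
        rw [hstep, hval, pv_inner]
        rw [PySem.Dict.items_insert_of_contains _ _ hc']
        rw [hD', PySem.Dict.items_insert_of_not_contains _ _ hc, List.map_append]
        have hno : ∀ p ∈ D.items, (p.1 == k) = false := by
          intro p hp
          have hpm : p.1 ∈ D.keys := List.mem_map.2 ⟨p, hp, rfl⟩
          simp only [beq_eq_false_iff_ne]
          intro he; exact hk ((hmemkeys k).1 (he ▸ hpm))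
        rw [pv_dedup_append, if_neg hk, List.map_append]
        congr 1
        · have h1 : List.map
              (fun p => if (p.1 == k) = true
                then (k, PySem.Dict.mk [("id", ([] : List Int) ++ [((ks.length : Int))])]) else p)
              D.items = List.map id D.items :=
            List.map_congr_left (fun p hp => by simp [hno p hp])
          rw [h1, List.map_id, ih]
          apply List.map_congr_left
          intro k' hk'
          have hk'ks : k' ∈ ks := (PySem.List.mem_dedup ks k').1 hk'
          have hne : ¬ (k = k') := fun he => hk (he ▸ hk'ks)
          simp [pvEntry, pv_gather_append, hne]
        · simp [pvEntry, pv_gather_append, pv_gather_of_not_mem ks k hk]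

-- ===== VERDICT (by name: the statement is the Claim_ definition above) =====
theorem boxes_classification_HW_Get_idx_spec : Claim_equal_boxes_classification_HW_Get_idx := by
  intro boxes X xw _
  unfold Spec_boxes_classification_HW_Get_idx boxes_classification_HW_Get_idx boxes_classification_HW_Get_idx_alt
  dsimp only
  have hfold :
      (PySem.List.enumerate (X.zip xw) 0).foldl
        (fun d p =>
          let key := PySem.Int.toStr p.2.1 ++ "_" ++ PySem.Int.toStr p.2.2
          let d := if d.contains key = false then d.insert key (PySem.Dict.mk [("id", [])]) else d
          d.modify key (PySem.Dict.mk []) (fun inner => inner.modify "id" [] (fun l => l ++ [p.1])))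
        PySem.Dict.empty
      = (PySem.List.enumerate
          ((X.zip xw).map (fun p => PySem.Int.toStr p.1 ++ "_" ++ PySem.Int.toStr p.2)) 0).foldl
          pvStep PySem.Dict.empty := by
    rw [pv_enumerate_map, List.foldl_map]
    rfl
  rw [hfold, pv_main, List.map_map]
  apply List.map_congr_left
  intro k _
  simp [pvEntry, pvGather]
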